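-- pv_equiv track=rewrite | github.com/stinisson/dice-game | app.py | petals
-- ===== SOURCE A (Python) =====
-- def petals(roll):
--     """
--     Take a list of dice heads and calculate the total number of dots according to 'Petals Around the Rose'.
--     Every dice with a dot in the middle has a head and the surrounding dots are the petals.
--     Thus, dice 5 has four petals. Dice 3 has two petals.
--     """
--     dot_sum = 0
--     for dice in roll:
--         if dice == 5:
--             dot_sum += 4
--         elif dice == 3:
--             dot_sum += 2
--     return dot_sum
-- ===== SOURCE B (Python) =====
-- def petals(roll):
--     return 2 * roll.count(3) + 4 * roll.count(5)
-- ===== Notes on version B (the rewrite author's own statement) =====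
-- stated objective: simpler
-- what changed: Replaced the branch-and-accumulate loop by counting occurrences of 3 and 5 and returning the closed-form 2*count(3)+4*count(5).
import Mathlib
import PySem

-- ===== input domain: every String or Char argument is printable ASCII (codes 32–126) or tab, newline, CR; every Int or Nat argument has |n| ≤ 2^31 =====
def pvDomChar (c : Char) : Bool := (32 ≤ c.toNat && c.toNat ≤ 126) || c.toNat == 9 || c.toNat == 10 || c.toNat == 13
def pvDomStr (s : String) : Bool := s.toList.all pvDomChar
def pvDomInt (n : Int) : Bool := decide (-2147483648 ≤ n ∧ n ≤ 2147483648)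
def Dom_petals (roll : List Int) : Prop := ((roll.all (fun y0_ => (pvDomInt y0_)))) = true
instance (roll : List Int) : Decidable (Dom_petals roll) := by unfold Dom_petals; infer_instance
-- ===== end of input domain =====

-- ===== PORT A =====
def petals (roll : List Int) : Int :=
  roll.foldl (fun dot_sum dice =>
    if dice == 5 then dot_sum + 4
    else if dice == 3 then dot_sum + 2
    else dot_sum) 0

-- ===== PORT B =====
def petals_alt (roll : List Int) : Int :=
  2 * PySem.List.count roll 3 + 4 * PySem.List.count roll 5

-- ===== PRECONDITION & SPEC =====
def Spec_petals (roll : List Int) (out : Int) : Prop := out = petals_alt roll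
instance (roll : List Int) (out : Int) : Decidable (Spec_petals roll out) := by unfold Spec_petals; infer_instance

-- ===== CLAIM (what is proved, stated in full; the proofs are below) =====
def Claim_equal_petals : Prop := ∀ (roll : List Int), Dom_petals roll → Spec_petals roll (petals roll)

-- ===== LEMMAS AND PROOFS =====

-- ===== VERDICT (by name: the statement is the Claim_ definition above) =====
theorem foldl_petals (roll : List Int) (s : Int) :
    roll.foldl (fun dot_sum dice =>
      if dice == 5 then dot_sum + 4
      else if dice == 3 then dot_sum + 2
      else dot_sum) s
    = s + 2 * PySem.List.count roll 3 + 4 * PySem.List.count roll 5 := by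
  induction roll generalizing s with
  | nil => simp [PySem.List.count]
  | cons h t ih =>
    simp only [List.foldl, ih, PySem.List.count, List.count_cons]
    by_cases h5 : h = (5:Int) <;> by_cases h3 : h = (3:Int) <;>
      simp_all <;> ring

theorem petals_spec : Claim_equal_petals := by
  intro roll _
  unfold Spec_petals petals petals_alt
  simpa using foldl_petals roll 0
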